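-- pv_equiv track=rewrite | github.com/mypaint/mypaint | lib/morphology.py | contig_vertical
-- ===== SOURCE A (Python) =====
-- def directly_below(coord1, coord2):
--     """ Return true if the first coordinate is directly below the second"""
--     return coord1[0] == coord2[0] and coord1[1] == coord2[1] + 1
--
-- def contig_vertical(coords):
--     """ Given a list of (x,y)-coordinates, group them in x, y order
--     where groups consist of elements with the same x coordinate
--     and consecutive y-coordinates
--
--     (e.g) [[(1, 1),  (1, 2)], [(1, 4)], [(2, 4), (2, 5)]]
--     """
--     result = []
--     group = []
--     previous = None
--     for tile_coord in sorted(coords):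
--         if previous is None or directly_below(tile_coord, previous):
--             group.append(tile_coord)
--         else:
--             result.append(group)
--             group = [tile_coord]
--         previous = tile_coord
--     if group:
--         result.append(group)
--     return result
-- ===== SOURCE B (Python) =====
-- def contig_vertical(coords):
--     """ Given a list of (x,y)-coordinates, group them in x, y order
--     where groups consist of elements with the same x coordinate
--     and consecutive y-coordinates
--     """
--     result = []
--     s = sorted(coords)
--     while s:
--         # take the leading column: the maximal prefix sharing s[0]'s x
--         x = s[0][0]
--         j = 0
--         while j < len(s) and s[j][0] == x:
--             j += 1
--         column = s[:j]
--         s = s[j:]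
--         # split this column into runs of consecutive y values
--         run = [column[0]]
--         prev_y = column[0][1]
--         for cur in column[1:]:
--             if cur[1] == prev_y + 1:
--                 run.append(cur)
--             else:
--                 result.append(run)
--                 run = [cur]
--             prev_y = cur[1]
--         result.append(run)
--     return result
-- ===== Notes on version B (the rewrite author's own statement) =====
-- stated objective: alternative
-- what changed: Replaces A's single flat pass carrying a 'previous' sentinel by a two-level traversal: the sorted list is cut into maximal same-x column blocks and each column is split into consecutive-y runs.
import Mathlib
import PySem

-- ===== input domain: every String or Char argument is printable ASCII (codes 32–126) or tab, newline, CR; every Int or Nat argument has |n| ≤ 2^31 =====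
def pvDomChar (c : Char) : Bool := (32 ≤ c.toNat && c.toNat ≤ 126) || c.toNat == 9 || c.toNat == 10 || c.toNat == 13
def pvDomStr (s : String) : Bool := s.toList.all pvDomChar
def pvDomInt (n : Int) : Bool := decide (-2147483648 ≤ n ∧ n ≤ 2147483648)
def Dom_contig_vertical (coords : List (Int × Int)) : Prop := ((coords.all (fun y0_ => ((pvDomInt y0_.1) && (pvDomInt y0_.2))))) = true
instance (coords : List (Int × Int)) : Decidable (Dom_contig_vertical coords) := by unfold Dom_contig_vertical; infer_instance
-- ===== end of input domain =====

-- B replaces A's single flat pass (with a 'previous' sentinel) by a two-level traversal: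
-- cut the sorted list into maximal same-x column blocks, then split each column into
-- consecutive-y runs; same cost, different decomposition (objective: alternative).


-- ===== PORT A =====
def directly_below (coord1 coord2 : Int × Int) : Bool :=
  coord1.1 == coord2.1 && coord1.2 == coord2.2 + 1

-- the body of A's for-loop, as a fold step over the state (result, group, previous)
def aStep (st : List (List (Int × Int)) × List (Int × Int) × Option (Int × Int))
    (tile_coord : Int × Int) :
    List (List (Int × Int)) × List (Int × Int) × Option (Int × Int) :=
  match st with
  | (result, group, previous) =>
    if (match previous with
        | none => true
        | some p => directly_below tile_coord p) then
      (result, group ++ [tile_coord], some tile_coord)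
    else
      (result ++ [group], [tile_coord], some tile_coord)

def contig_vertical (coords : List (Int × Int)) : List (List (Int × Int)) :=
  let st := (PySem.List.sorted2 coords (fun c => c.1) (fun c => c.2)).foldl aStep ([], [], none)
  if st.2.1 = [] then st.1 else st.1 ++ [st.2.1]

-- ===== PORT B =====
-- 'while j < len(s) and s[j][0] == x: j += 1' starting at the position after s[0]:
-- length of the maximal prefix whose x-coordinate is x
def bColLen (x : Int) : List (Int × Int) → Nat
  | [] => 0
  | c :: cs => if c.1 == x then bColLen x cs + 1 else 0

theorem bColLen_drop_lt (c : Int × Int) (cs : List (Int × Int)) :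
    (cs.drop (bColLen c.1 cs)).length < (c :: cs).length := by
  simp only [List.length_drop, List.length_cons]; omega

-- the body of B's inner for-loop over the column tail: state (result, run, prev_y)
def bRunStep (st : List (List (Int × Int)) × List (Int × Int) × Int) (cur : Int × Int) :
    List (List (Int × Int)) × List (Int × Int) × Int :=
  match st with
  | (result, run, prev_y) =>
    if cur.2 == prev_y + 1 then (result, run ++ [cur], cur.2)
    else (result ++ [run], [cur], cur.2)

-- B's outer while-loop: peel off the leading column (c :: column'), split it into runs,
-- append them to result, continue on the remainder.  s[:j] = c :: cs.take (j-1) and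
-- s[j:] = cs.drop (j-1) since j = bColLen c.1 (c::cs) = bColLen c.1 cs + 1 ≥ 1 (exact
-- for Python's slices with a nonnegative in-range bound).
def bLoop : List (Int × Int) → List (List (Int × Int)) → List (List (Int × Int))
  | [], result => result
  | c :: cs, result =>
      let column' := cs.take (bColLen c.1 cs)   -- column = [column[0]] ++ column' with column[0] = c
      let rest := cs.drop (bColLen c.1 cs)
      let st := column'.foldl bRunStep (result, [c], c.2)  -- run = [column[0]], prev_y = column[0][1]
      bLoop rest (st.1 ++ [st.2.1])             -- result.append(run); continue with s = rest
  termination_by s _ => s.length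
  decreasing_by exact bColLen_drop_lt c cs

def contig_vertical_alt (coords : List (Int × Int)) : List (List (Int × Int)) :=
  bLoop (PySem.List.sorted2 coords (fun c => c.1) (fun c => c.2)) []

-- ===== PRECONDITION & SPEC =====
def Spec_contig_vertical (coords : List (Int × Int)) (out : List (List (Int × Int))) : Prop := out = contig_vertical_alt coords
instance (coords : List (Int × Int)) (out : List (List (Int × Int))) : Decidable (Spec_contig_vertical coords out) := by unfold Spec_contig_vertical; infer_instance

-- ===== CLAIM (what is proved, stated in full; the proofs are below) =====
def Claim_equal_contig_vertical : Prop := ∀ (coords : List (Int × Int)), Dom_contig_vertical coords → Spec_contig_vertical coords (contig_vertical coords)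

-- ===== LEMMAS AND PROOFS =====

-- A's epilogue: 'if group: result.append(group); return result'
def finishA (st : List (List (Int × Int)) × List (Int × Int) × Option (Int × Int)) :
    List (List (Int × Int)) :=
  if st.2.1 = [] then st.1 else st.1 ++ [st.2.1]

-- B's per-column epilogue: 'result.append(run)'
def finishB (st : List (List (Int × Int)) × List (Int × Int) × Int) :
    List (List (Int × Int)) :=
  st.1 ++ [st.2.1]

-- span of the run starting after previous element p (A's continuation condition)
def spanRun (p : Int × Int) : List (Int × Int) → List (Int × Int) × List (Int × Int)
  | [] => ([], [])
  | c :: cs =>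
    if directly_below c p then
      let r := spanRun c cs; (c :: r.1, r.2)
    else ([], c :: cs)

theorem spanRun_snd_len (p : Int × Int) (cs : List (Int × Int)) :
    (spanRun p cs).2.length ≤ cs.length := by
  induction cs generalizing p with
  | nil => simp [spanRun]
  | cons c cs ih =>
    simp only [spanRun]
    split
    · exact Nat.le_succ_of_le (ih c)
    · simp

-- canonical run decomposition of a list (reference form of A's pass)
def splitRuns : List (Int × Int) → List (List (Int × Int))
  | [] => []
  | c :: cs => (c :: (spanRun c cs).1) :: splitRuns (spanRun c cs).2
  termination_by l => l.length
  decreasing_by exact Nat.lt_succ_of_le (spanRun_snd_len c cs)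

theorem splitRuns_cons (c : Int × Int) (cs : List (Int × Int)) :
    splitRuns (c :: cs) = (c :: (spanRun c cs).1) :: splitRuns (spanRun c cs).2 := by
  rw [splitRuns.eq_def]

-- span of the y-consecutive run within one column (B's continuation condition)
def spanY (py : Int) : List (Int × Int) → List (Int × Int) × List (Int × Int)
  | [] => ([], [])
  | c :: cs =>
    if c.2 == py + 1 then
      let r := spanY c.2 cs; (c :: r.1, r.2)
    else ([], c :: cs)

theorem spanY_snd_len (py : Int) (cs : List (Int × Int)) :
    (spanY py cs).2.length ≤ cs.length := by
  induction cs generalizing py with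
  | nil => simp [spanY]
  | cons c cs ih =>
    simp only [spanY]
    split
    · exact Nat.le_succ_of_le (ih c.2)
    · simp

theorem spanY_snd_mem (py : Int) (cs : List (Int × Int)) (a : Int × Int)
    (h : a ∈ (spanY py cs).2) : a ∈ cs := by
  induction cs generalizing py with
  | nil => simp [spanY] at h
  | cons c cs ih =>
    simp only [spanY] at h
    split at h
    · exact List.mem_cons_of_mem c (ih c.2 h)
    · exact h

-- runs of one column (all x equal: only the y condition is tested)
def colRuns : List (Int × Int) → List (List (Int × Int))
  | [] => []
  | c :: cs => (c :: (spanY c.2 cs).1) :: colRuns (spanY c.2 cs).2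
  termination_by l => l.length
  decreasing_by exact Nat.lt_succ_of_le (spanY_snd_len c.2 cs)

theorem colRuns_cons (c : Int × Int) (cs : List (Int × Int)) :
    colRuns (c :: cs) = (c :: (spanY c.2 cs).1) :: colRuns (spanY c.2 cs).2 := by
  rw [colRuns.eq_def]

theorem aStep_some (res : List (List (Int × Int))) (g : List (Int × Int))
    (p c : Int × Int) :
    aStep (res, g, some p) c =
      if directly_below c p then (res, g ++ [c], some c)
      else (res ++ [g], [c], some c) := rfl

-- ---- A's fold computes splitRuns ----
theorem foldA (cs : List (Int × Int)) : ∀ (p : Int × Int) (g : List (Int × Int))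
    (res : List (List (Int × Int))), g ≠ [] →
    finishA (cs.foldl aStep (res, g, some p)) =
      res ++ ((g ++ (spanRun p cs).1) :: splitRuns (spanRun p cs).2) := by
  induction cs with
  | nil =>
    intro p g res hg
    simp [finishA, spanRun, splitRuns, hg]
  | cons c cs ih =>
    intro p g res hg
    rw [List.foldl_cons, aStep_some]
    by_cases hb : directly_below c p = true
    · rw [if_pos hb, ih c (g ++ [c]) res (by simp)]
      simp only [spanRun, hb, if_true]
      simp
    · rw [if_neg (by simp [hb]), ih c [c] (res ++ [g]) (by simp)]
      rw [show spanRun p (c :: cs) = ([], c :: cs) by simp [spanRun, hb]]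
      rw [splitRuns_cons]
      simp

theorem contig_vertical_eq_splitRuns (coords : List (Int × Int)) :
    contig_vertical coords =
      splitRuns (PySem.List.sorted2 coords (fun c => c.1) (fun c => c.2)) := by
  unfold contig_vertical
  cases h : PySem.List.sorted2 coords (fun c => c.1) (fun c => c.2) with
  | nil => simp [splitRuns]
  | cons c cs =>
    show finishA ((c :: cs).foldl aStep ([], [], none)) = _
    rw [List.foldl_cons,
      show aStep ([], [], none) c = ([], [c], some c) from rfl,
      foldA cs c [c] [] (by simp)]
    rw [splitRuns_cons]
    simp

-- ---- B's inner fold computes the runs of the column ----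
theorem foldB (col : List (Int × Int)) : ∀ (py : Int) (r : List (Int × Int))
    (res : List (List (Int × Int))),
    finishB (col.foldl bRunStep (res, r, py)) =
      res ++ ((r ++ (spanY py col).1) :: colRuns ((spanY py col).2)) := by
  induction col with
  | nil => intro py r res; simp [finishB, spanY, colRuns]
  | cons d ds ih =>
    intro py r res
    rw [List.foldl_cons,
      show bRunStep (res, r, py) d =
        if d.2 == py + 1 then (res, r ++ [d], d.2) else (res ++ [r], [d], d.2) from rfl]
    by_cases hb : (d.2 == py + 1) = true
    · rw [if_pos hb, ih d.2 (r ++ [d]) res]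
      simp only [spanY, hb, if_true]
      simp
    · rw [if_neg hb, ih d.2 [d] (res ++ [r])]
      rw [show spanY py (d :: ds) = ([], d :: ds) by simp [spanY, hb]]
      rw [colRuns_cons]
      simp

-- every element of the column prefix has x-coordinate x
theorem bColLen_take_fst (x : Int) (cs : List (Int × Int)) (a : Int × Int)
    (h : a ∈ cs.take (bColLen x cs)) : a.1 = x := by
  induction cs with
  | nil => simp [bColLen] at h
  | cons c cs ih =>
    simp only [bColLen] at h
    by_cases hc : (c.1 == x) = true
    · simp only [hc, if_true, List.take_succ_cons, List.mem_cons] at h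
      rcases h with h | h
      · subst h; exact beq_iff_eq.mp hc
      · exact ih h
    · simp [hc] at h

-- the head of the remainder (if any) has a different x-coordinate
theorem bColLen_drop_head (x : Int) (cs : List (Int × Int)) (h : Int × Int)
    (t : List (Int × Int)) (hd : cs.drop (bColLen x cs) = h :: t) : h.1 ≠ x := by
  induction cs with
  | nil => simp [bColLen] at hd
  | cons c cs ih =>
    by_cases hc : (c.1 == x) = true
    · rw [show bColLen x (c :: cs) = bColLen x cs + 1 by simp [bColLen, hc],
        List.drop_succ_cons] at hd
      exact ih hd
    · rw [show bColLen x (c :: cs) = 0 by simp [bColLen, hc], List.drop_zero] at hd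
      cases hd
      exact fun he => hc (beq_iff_eq.mpr he)

-- inside a same-x block followed by a different-x head, A's span is B's y-span
theorem spanRun_eq_spanY (ys : List (Int × Int)) : ∀ (x : Int) (p : Int × Int)
    (rest : List (Int × Int)), p.1 = x → (∀ a ∈ ys, a.1 = x) →
    (∀ h t, rest = h :: t → h.1 ≠ x) →
    spanRun p (ys ++ rest) = ((spanY p.2 ys).1, (spanY p.2 ys).2 ++ rest) := by
  induction ys with
  | nil =>
    intro x p rest hp _ hrest
    cases rest with
    | nil => simp [spanRun, spanY]
    | cons h t =>
      have hnb : directly_below h p = false := by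
        simp only [directly_below, Bool.and_eq_false_iff]
        left
        exact beq_eq_false_iff_ne.mpr (fun he => hrest h t rfl (he.trans hp))
      simp [spanRun, spanY, hnb]
  | cons d ds ih =>
    intro x p rest hp hys hrest
    have hd1 : d.1 = x := hys d (List.mem_cons_self)
    have hdb : directly_below d p = (d.2 == p.2 + 1) := by
      simp [directly_below, hd1, hp]
    simp only [List.cons_append, spanRun, hdb, spanY]
    by_cases hb : (d.2 == p.2 + 1) = true
    · simp only [hb, if_true]
      rw [ih x d rest hd1 (fun a ha => hys a (List.mem_cons_of_mem d ha)) hrest]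
    · simp [hb]

-- splitRuns on a same-x block followed by a different-x remainder splits into
-- the column's runs and the runs of the remainder
theorem splitRuns_append (n : Nat) : ∀ (ys : List (Int × Int)), ys.length ≤ n →
    ∀ (x : Int) (rest : List (Int × Int)), (∀ a ∈ ys, a.1 = x) →
    (∀ h t, rest = h :: t → h.1 ≠ x) →
    splitRuns (ys ++ rest) = colRuns ys ++ splitRuns rest := by
  induction n with
  | zero =>
    intro ys hlen x rest _ _
    have : ys = [] := List.length_eq_zero_iff.mp (Nat.le_zero.mp hlen)
    subst this
    simp [colRuns]
  | succ n ih =>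
    intro ys hlen x rest hys hrest
    cases ys with
    | nil => simp [colRuns]
    | cons y ys' =>
      have hy1 : y.1 = x := hys y (List.mem_cons_self)
      have hys' : ∀ a ∈ ys', a.1 = x := fun a ha => hys a (List.mem_cons_of_mem y ha)
      rw [List.cons_append, splitRuns,
        spanRun_eq_spanY ys' x y rest hy1 hys' hrest]
      rw [colRuns, List.cons_append]
      congr 1
      have hsub : ∀ a ∈ (spanY y.2 ys').2, a.1 = x :=
        fun a ha => hys' a (spanY_snd_mem y.2 ys' a ha)
      have hlen' : (spanY y.2 ys').2.length ≤ n := by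
        have := spanY_snd_len y.2 ys'
        simp only [List.length_cons] at hlen
        omega
      exact ih (spanY y.2 ys').2 hlen' x rest hsub hrest

-- ---- B computes splitRuns ----
theorem bLoop_eq (n : Nat) : ∀ (s : List (Int × Int)), s.length ≤ n →
    ∀ (res : List (List (Int × Int))), bLoop s res = res ++ splitRuns s := by
  induction n with
  | zero =>
    intro s hlen res
    have : s = [] := List.length_eq_zero_iff.mp (Nat.le_zero.mp hlen)
    subst this
    simp [bLoop, splitRuns]
  | succ n ih =>
    intro s hlen res
    cases s with
    | nil => simp [bLoop, splitRuns]
    | cons c cs =>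
      rw [bLoop]
      show bLoop (cs.drop (bColLen c.1 cs))
          (finishB ((cs.take (bColLen c.1 cs)).foldl bRunStep (res, [c], c.2))) = _
      have hrestlen : (cs.drop (bColLen c.1 cs)).length ≤ n := by
        simp only [List.length_drop]
        simp only [List.length_cons] at hlen
        omega
      rw [foldB (cs.take (bColLen c.1 cs)) c.2 [c] res,
        ih (cs.drop (bColLen c.1 cs)) hrestlen]
      -- rewrite splitRuns (c :: cs) through the column decomposition
      rw [splitRuns_cons]
      conv_rhs => rw [show spanRun c cs
        = spanRun c (cs.take (bColLen c.1 cs) ++ cs.drop (bColLen c.1 cs)) by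
          rw [List.take_append_drop]]
      rw [spanRun_eq_spanY (cs.take (bColLen c.1 cs)) c.1 c (cs.drop (bColLen c.1 cs)) rfl
        (fun a ha => bColLen_take_fst c.1 cs a ha)
        (fun h t ht => bColLen_drop_head c.1 cs h t ht)]
      have hmem : ∀ a ∈ (spanY c.2 (cs.take (bColLen c.1 cs))).2, a.1 = c.1 := by
        intro a ha
        have h1 : a ∈ cs.take (bColLen c.1 cs) :=
          spanY_snd_mem c.2 (cs.take (bColLen c.1 cs)) a ha
        exact bColLen_take_fst c.1 cs a h1
      rw [splitRuns_append ((spanY c.2 (cs.take (bColLen c.1 cs))).2.length)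
        (spanY c.2 (cs.take (bColLen c.1 cs))).2 le_rfl c.1 (cs.drop (bColLen c.1 cs))
        hmem (fun h t ht => bColLen_drop_head c.1 cs h t ht)]
      simp

-- ===== VERDICT (by name: the statement is the Claim_ definition above) =====
theorem contig_vertical_spec : Claim_equal_contig_vertical := by
  intro coords _
  unfold Spec_contig_vertical contig_vertical_alt
  rw [bLoop_eq (PySem.List.sorted2 coords (fun c => c.1) (fun c => c.2)).length _ le_rfl]
  rw [contig_vertical_eq_splitRuns]
  simp
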